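-- pv_equiv track=rewrite | github.com/kiraputri/Tubes-TBA | token.py | isObjek
-- ===== SOURCE A (Python) =====
-- def isObjek(word: str) -> bool:
--     # Objek = {'buku', 'kamus', 'koran', 'komik', 'majalah'}
--     currState = 0
--     for letter in word:
--         match currState:
--             case -1: break
--             case 0:
--                 if letter == 'b': currState = 1
--                 elif letter == 'k': currState = 2
--                 elif letter == 'm': currState = 3
--                 else: currState = -1
--             case 1: currState = 4 if letter == 'u' else -1
--             case 4: currState = 5 if letter == 'k' else -1
--             case 5: currState = 6 if letter == 'u' else -1 # final state
--             case 6: currState = 6 if letter == ' ' else -1 # final state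
--             case 2:
--                 if letter == 'a': currState = 7
--                 elif letter == 'o': currState = 8
--                 else: currState = -1
--             case 7: currState = 9 if letter == 'm' else -1
--             case 9: currState = 10 if letter == 'u' else -1
--             case 10: currState = 11 if letter == 's' else -1 # final state
--             case 11: currState = 11 if letter == ' ' else -1 # final state
--             case 8: currState = 12 if letter == 'r' else -1
--             case 12: currState = 13 if letter == 'a' else -1
--             case 13: currState = 14 if letter == 'n' else -1 # final state
--             case 14: currState = 14 if letter == ' ' else -1 # final state
--             case 3: currState = 15 if letter == 'a' else -1
--             case 15: currState = 16 if letter == 'j' else -1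
--             case 16: currState = 17 if letter == 'a' else -1
--             case 17: currState = 18 if letter == 'l' else -1
--             case 18: currState = 19 if letter == 'a' else -1
--             case 19: currState = 20 if letter == 'h' else -1 # final state
--             case 20: currState = 20 if letter == ' ' else -1 # final state
--     return currState == 6 or currState == 11 or currState == 14 or currState == 20
-- ===== SOURCE B (Python) =====
-- _OBJEK = {'buku', 'kamus', 'koran', 'majalah'}
--
-- def isObjek(word: str) -> bool:
--     # The DFA in A accepts exactly these four keywords followed by any
--     # number of trailing ASCII spaces ('komik' in A's comment has no path).
--     return word.rstrip(' ') in _OBJEK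
-- ===== Notes on version B (the rewrite author's own statement) =====
-- stated objective: simpler
-- what changed: Replaced the 21-state hand-written DFA loop with rstrip(' ') followed by membership in the set of the four keywords the DFA actually accepts (the commented 'komik' has no path).
import Mathlib
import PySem

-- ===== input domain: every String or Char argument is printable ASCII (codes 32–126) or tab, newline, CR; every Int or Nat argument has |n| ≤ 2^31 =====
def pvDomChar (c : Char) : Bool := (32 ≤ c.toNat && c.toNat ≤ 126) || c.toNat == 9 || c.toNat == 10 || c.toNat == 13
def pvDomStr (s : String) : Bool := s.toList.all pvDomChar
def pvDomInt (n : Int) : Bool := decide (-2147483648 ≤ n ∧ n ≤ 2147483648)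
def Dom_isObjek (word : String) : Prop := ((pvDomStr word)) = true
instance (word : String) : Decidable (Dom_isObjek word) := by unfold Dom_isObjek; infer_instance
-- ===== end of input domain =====

-- B replaces A's hand-written 21-state DFA loop by rstrip(' ') plus membership in the
-- four keywords the DFA actually accepts; objective: simpler.

-- ===== PORT A =====
-- One step of A's `match currState` body.  Python's `case -1: break` exits the loop;
-- since no later iteration would change -1, returning -1 forever is the same result.
-- A `match` with no matching case leaves the state unchanged (the final `else s`).
def pvStep (s : Int) (c : Char) : Int :=
  if s = -1 then -1
  else if s = 0 then (if c = 'b' then 1 else if c = 'k' then 2 else if c = 'm' then 3 else -1)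
  else if s = 1 then (if c = 'u' then 4 else -1)
  else if s = 4 then (if c = 'k' then 5 else -1)
  else if s = 5 then (if c = 'u' then 6 else -1)
  else if s = 6 then (if c = ' ' then 6 else -1)
  else if s = 2 then (if c = 'a' then 7 else if c = 'o' then 8 else -1)
  else if s = 7 then (if c = 'm' then 9 else -1)
  else if s = 9 then (if c = 'u' then 10 else -1)
  else if s = 10 then (if c = 's' then 11 else -1)
  else if s = 11 then (if c = ' ' then 11 else -1)
  else if s = 8 then (if c = 'r' then 12 else -1)
  else if s = 12 then (if c = 'a' then 13 else -1)
  else if s = 13 then (if c = 'n' then 14 else -1)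
  else if s = 14 then (if c = ' ' then 14 else -1)
  else if s = 3 then (if c = 'a' then 15 else -1)
  else if s = 15 then (if c = 'j' then 16 else -1)
  else if s = 16 then (if c = 'a' then 17 else -1)
  else if s = 17 then (if c = 'l' then 18 else -1)
  else if s = 18 then (if c = 'a' then 19 else -1)
  else if s = 19 then (if c = 'h' then 20 else -1)
  else if s = 20 then (if c = ' ' then 20 else -1)
  else s

def isObjek (word : String) : Bool :=
  let currState := word.toList.foldl pvStep 0
  currState == 6 || currState == 11 || currState == 14 || currState == 20

-- ===== PORT B =====
-- exact port of str.rstrip(' '): drop trailing ' ' characters only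
def pvRstripSpaces (l : List Char) : List Char := (l.reverse.dropWhile (· == ' ')).reverse

def pvObjekWords : List (List Char) :=
  [['b','u','k','u'], ['k','a','m','u','s'], ['k','o','r','a','n'], ['m','a','j','a','l','a','h']]

def isObjek_alt (word : String) : Bool :=
  pvObjekWords.contains (pvRstripSpaces word.toList)

-- ===== PRECONDITION & SPEC =====
def Spec_isObjek (word : String) (out : Bool) : Prop := out = isObjek_alt word
instance (word : String) (out : Bool) : Decidable (Spec_isObjek word out) := by unfold Spec_isObjek; infer_instance

-- ===== CLAIM (what is proved, stated in full; the proofs are below) =====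
def Claim_equal_isObjek : Prop := ∀ (word : String), Dom_isObjek word → Spec_isObjek word (isObjek word)

-- ===== LEMMAS AND PROOFS =====

-- `pvMatchSp w l` : l is exactly w followed by spaces
def pvMatchSp : List Char → List Char → Bool
  | [], l => l.all (· == ' ')
  | _ :: _, [] => false
  | c :: w, d :: l => (d == c) && pvMatchSp w l

-- acceptance language of the DFA from state s
def pvSpec (s : Int) (l : List Char) : Bool :=
  if s = 0 then pvMatchSp ['b','u','k','u'] l || pvMatchSp ['k','a','m','u','s'] l
            || pvMatchSp ['k','o','r','a','n'] l || pvMatchSp ['m','a','j','a','l','a','h'] l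
  else if s = 1 then pvMatchSp ['u','k','u'] l
  else if s = 4 then pvMatchSp ['k','u'] l
  else if s = 5 then pvMatchSp ['u'] l
  else if s = 6 then pvMatchSp [] l
  else if s = 2 then pvMatchSp ['a','m','u','s'] l || pvMatchSp ['o','r','a','n'] l
  else if s = 7 then pvMatchSp ['m','u','s'] l
  else if s = 9 then pvMatchSp ['u','s'] l
  else if s = 10 then pvMatchSp ['s'] l
  else if s = 11 then pvMatchSp [] l
  else if s = 8 then pvMatchSp ['r','a','n'] l
  else if s = 12 then pvMatchSp ['a','n'] l
  else if s = 13 then pvMatchSp ['n'] l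
  else if s = 14 then pvMatchSp [] l
  else if s = 3 then pvMatchSp ['a','j','a','l','a','h'] l
  else if s = 15 then pvMatchSp ['j','a','l','a','h'] l
  else if s = 16 then pvMatchSp ['a','l','a','h'] l
  else if s = 17 then pvMatchSp ['l','a','h'] l
  else if s = 18 then pvMatchSp ['a','h'] l
  else if s = 19 then pvMatchSp ['h'] l
  else if s = 20 then pvMatchSp [] l
  else false

def pvFinal (s : Int) : Bool := s == 6 || s == 11 || s == 14 || s == 20

lemma pvMain : ∀ (l : List Char) (s : Int), pvFinal (l.foldl pvStep s) = pvSpec s l := by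
  intro l
  induction l with
  | nil =>
      intro s
      simp only [List.foldl_nil]
      by_cases h0 : s = -1
      · subst h0; decide
      by_cases h1 : s = 0
      · subst h1; decide
      by_cases h2 : s = 1
      · subst h2; decide
      by_cases h3 : s = 4
      · subst h3; decide
      by_cases h4 : s = 5
      · subst h4; decide
      by_cases h5 : s = 6
      · subst h5; decide
      by_cases h6 : s = 2
      · subst h6; decide
      by_cases h7 : s = 7
      · subst h7; decide
      by_cases h8 : s = 9
      · subst h8; decide
      by_cases h9 : s = 10
      · subst h9; decide
      by_cases h10 : s = 11
      · subst h10; decide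
      by_cases h11 : s = 8
      · subst h11; decide
      by_cases h12 : s = 12
      · subst h12; decide
      by_cases h13 : s = 13
      · subst h13; decide
      by_cases h14 : s = 14
      · subst h14; decide
      by_cases h15 : s = 3
      · subst h15; decide
      by_cases h16 : s = 15
      · subst h16; decide
      by_cases h17 : s = 16
      · subst h17; decide
      by_cases h18 : s = 17
      · subst h18; decide
      by_cases h19 : s = 18
      · subst h19; decide
      by_cases h20 : s = 19
      · subst h20; decide
      by_cases h21 : s = 20
      · subst h21; decide
      simp [pvFinal, pvSpec, h1, h2, h3, h4, h5, h6, h7, h8, h9, h10, h11, h12, h13, h14, h15, h16, h17, h18, h19, h20, h21]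
  | cons c t ih =>
      intro s
      rw [List.foldl_cons, ih]
      show pvSpec (pvStep s c) t = pvSpec s (c :: t)
      by_cases h0 : s = -1
      · subst h0; simp [pvStep, pvSpec]
      by_cases h1 : s = 0
      · subst h1
        by_cases c1_0 : c = 'b'
        · subst c1_0; simp [pvStep, pvSpec, pvMatchSp]
        by_cases c1_1 : c = 'k'
        · subst c1_1; simp [pvStep, pvSpec, pvMatchSp]
        by_cases c1_2 : c = 'm'
        · subst c1_2; simp [pvStep, pvSpec, pvMatchSp]
        simp [pvStep, pvSpec, pvMatchSp, c1_0, c1_1, c1_2]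
      by_cases h2 : s = 1
      · subst h2
        by_cases c2_0 : c = 'u'
        · subst c2_0; simp [pvStep, pvSpec, pvMatchSp]
        simp [pvStep, pvSpec, pvMatchSp, c2_0]
      by_cases h3 : s = 4
      · subst h3
        by_cases c3_0 : c = 'k'
        · subst c3_0; simp [pvStep, pvSpec, pvMatchSp]
        simp [pvStep, pvSpec, pvMatchSp, c3_0]
      by_cases h4 : s = 5
      · subst h4
        by_cases c4_0 : c = 'u'
        · subst c4_0; simp [pvStep, pvSpec, pvMatchSp]
        simp [pvStep, pvSpec, pvMatchSp, c4_0]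
      by_cases h5 : s = 6
      · subst h5
        by_cases c5_0 : c = ' '
        · subst c5_0; simp [pvStep, pvSpec, pvMatchSp]
        simp [pvStep, pvSpec, pvMatchSp, c5_0]
      by_cases h6 : s = 2
      · subst h6
        by_cases c6_0 : c = 'a'
        · subst c6_0; simp [pvStep, pvSpec, pvMatchSp]
        by_cases c6_1 : c = 'o'
        · subst c6_1; simp [pvStep, pvSpec, pvMatchSp]
        simp [pvStep, pvSpec, pvMatchSp, c6_0, c6_1]
      by_cases h7 : s = 7
      · subst h7
        by_cases c7_0 : c = 'm'
        · subst c7_0; simp [pvStep, pvSpec, pvMatchSp]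
        simp [pvStep, pvSpec, pvMatchSp, c7_0]
      by_cases h8 : s = 9
      · subst h8
        by_cases c8_0 : c = 'u'
        · subst c8_0; simp [pvStep, pvSpec, pvMatchSp]
        simp [pvStep, pvSpec, pvMatchSp, c8_0]
      by_cases h9 : s = 10
      · subst h9
        by_cases c9_0 : c = 's'
        · subst c9_0; simp [pvStep, pvSpec, pvMatchSp]
        simp [pvStep, pvSpec, pvMatchSp, c9_0]
      by_cases h10 : s = 11
      · subst h10
        by_cases c10_0 : c = ' '
        · subst c10_0; simp [pvStep, pvSpec, pvMatchSp]
        simp [pvStep, pvSpec, pvMatchSp, c10_0]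
      by_cases h11 : s = 8
      · subst h11
        by_cases c11_0 : c = 'r'
        · subst c11_0; simp [pvStep, pvSpec, pvMatchSp]
        simp [pvStep, pvSpec, pvMatchSp, c11_0]
      by_cases h12 : s = 12
      · subst h12
        by_cases c12_0 : c = 'a'
        · subst c12_0; simp [pvStep, pvSpec, pvMatchSp]
        simp [pvStep, pvSpec, pvMatchSp, c12_0]
      by_cases h13 : s = 13
      · subst h13
        by_cases c13_0 : c = 'n'
        · subst c13_0; simp [pvStep, pvSpec, pvMatchSp]
        simp [pvStep, pvSpec, pvMatchSp, c13_0]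
      by_cases h14 : s = 14
      · subst h14
        by_cases c14_0 : c = ' '
        · subst c14_0; simp [pvStep, pvSpec, pvMatchSp]
        simp [pvStep, pvSpec, pvMatchSp, c14_0]
      by_cases h15 : s = 3
      · subst h15
        by_cases c15_0 : c = 'a'
        · subst c15_0; simp [pvStep, pvSpec, pvMatchSp]
        simp [pvStep, pvSpec, pvMatchSp, c15_0]
      by_cases h16 : s = 15
      · subst h16
        by_cases c16_0 : c = 'j'
        · subst c16_0; simp [pvStep, pvSpec, pvMatchSp]
        simp [pvStep, pvSpec, pvMatchSp, c16_0]
      by_cases h17 : s = 16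
      · subst h17
        by_cases c17_0 : c = 'a'
        · subst c17_0; simp [pvStep, pvSpec, pvMatchSp]
        simp [pvStep, pvSpec, pvMatchSp, c17_0]
      by_cases h18 : s = 17
      · subst h18
        by_cases c18_0 : c = 'l'
        · subst c18_0; simp [pvStep, pvSpec, pvMatchSp]
        simp [pvStep, pvSpec, pvMatchSp, c18_0]
      by_cases h19 : s = 18
      · subst h19
        by_cases c19_0 : c = 'a'
        · subst c19_0; simp [pvStep, pvSpec, pvMatchSp]
        simp [pvStep, pvSpec, pvMatchSp, c19_0]
      by_cases h20 : s = 19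
      · subst h20
        by_cases c20_0 : c = 'h'
        · subst c20_0; simp [pvStep, pvSpec, pvMatchSp]
        simp [pvStep, pvSpec, pvMatchSp, c20_0]
      by_cases h21 : s = 20
      · subst h21
        by_cases c21_0 : c = ' '
        · subst c21_0; simp [pvStep, pvSpec, pvMatchSp]
        simp [pvStep, pvSpec, pvMatchSp, c21_0]
      simp [pvStep, pvSpec, h0, h1, h2, h3, h4, h5, h6, h7, h8, h9, h10, h11, h12, h13, h14, h15, h16, h17, h18, h19, h20, h21]

lemma pvMatchSp_iff (w l : List Char) :
    pvMatchSp w l = true ↔ ∃ n, l = w ++ List.replicate n ' ' := by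
  induction w generalizing l with
  | nil =>
      simp only [pvMatchSp, List.all_eq_true, List.nil_append]
      constructor
      · intro h
        exact ⟨l.length, (List.eq_replicate_iff.2 ⟨rfl, fun b hb => by simpa using h b hb⟩)⟩
      · rintro ⟨n, rfl⟩ b hb
        simp_all [List.eq_of_mem_replicate hb]
  | cons c w ih =>
      cases l with
      | nil =>
          simp only [pvMatchSp]
          constructor
          · intro h; cases h
          · rintro ⟨n, h⟩; simp at h
      | cons d l =>
          simp only [pvMatchSp, Bool.and_eq_true, beq_iff_eq, ih, List.cons_append]
          constructor
          · rintro ⟨rfl, n, rfl⟩; exact ⟨n, rfl⟩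
          · rintro ⟨n, h⟩
            rw [List.cons_eq_cons] at h
            exact ⟨h.1, n, h.2⟩

lemma pvDropWhile_replicate_space (n : Nat) :
    List.dropWhile (· == ' ') (List.replicate n ' ') = ([] : List Char) := by
  induction n with
  | zero => rfl
  | succ n ih => simp [List.replicate_succ, ih]

lemma pvRstrip_append (w : List Char) (n : Nat) (hw : w.getLast? ≠ some ' ') :
    pvRstripSpaces (w ++ List.replicate n ' ') = w := by
  unfold pvRstripSpaces
  rw [List.reverse_append, List.reverse_replicate, List.dropWhile_append,
      pvDropWhile_replicate_space]
  simp only [List.isEmpty_nil, if_true]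
  have : List.dropWhile (· == ' ') w.reverse = w.reverse := by
    cases hrev : w.reverse with
    | nil => rfl
    | cons a t =>
        have ha : w.getLast? = some a := by
          rw [← List.head?_reverse, hrev]; rfl
        have : (a == ' ') = false := by
          simp only [beq_eq_false_iff_ne, ne_eq]
          intro h; exact hw (h ▸ ha)
        simp [this]
  rw [this, List.reverse_reverse]

lemma pvRstrip_decomp (l : List Char) :
    ∃ n, l = pvRstripSpaces l ++ List.replicate n ' ' := by
  refine ⟨(l.reverse.takeWhile (· == ' ')).length, ?_⟩
  have htw : l.reverse.takeWhile (· == ' ') =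
      List.replicate (l.reverse.takeWhile (· == ' ')).length ' ' := by
    apply List.eq_replicate_iff.2
    refine ⟨rfl, fun b hb => ?_⟩
    have := List.mem_takeWhile_imp hb
    simpa using this
  calc l = (List.takeWhile (· == ' ') l.reverse ++ List.dropWhile (· == ' ') l.reverse).reverse := by
            rw [List.takeWhile_append_dropWhile, List.reverse_reverse]
    _ = (List.dropWhile (· == ' ') l.reverse).reverse
          ++ (List.takeWhile (· == ' ') l.reverse).reverse := by rw [List.reverse_append]
    _ = pvRstripSpaces l ++ List.replicate (List.takeWhile (· == ' ') l.reverse).length ' ' := by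
            rw [htw]
            simp [pvRstripSpaces, List.reverse_replicate]

lemma pvMatchSp_eq_rstrip (w l : List Char) (hw : w.getLast? ≠ some ' ') :
    pvMatchSp w l = (pvRstripSpaces l == w) := by
  rw [Bool.eq_iff_iff, pvMatchSp_iff, beq_iff_eq]
  constructor
  · rintro ⟨n, rfl⟩
    exact pvRstrip_append w n hw
  · rintro rfl
    exact pvRstrip_decomp l

theorem pvAB (l : List Char) :
    pvFinal (l.foldl pvStep 0) = pvObjekWords.contains (pvRstripSpaces l) := by
  rw [pvMain]
  have h1 := pvMatchSp_eq_rstrip ['b','u','k','u'] l (by decide)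
  have h2 := pvMatchSp_eq_rstrip ['k','a','m','u','s'] l (by decide)
  have h3 := pvMatchSp_eq_rstrip ['k','o','r','a','n'] l (by decide)
  have h4 := pvMatchSp_eq_rstrip ['m','a','j','a','l','a','h'] l (by decide)
  simp [pvSpec, h1, h2, h3, h4, pvObjekWords, Bool.or_assoc, beq_eq_decide]

-- ===== VERDICT (by name: the statement is the Claim_ definition above) =====
theorem isObjek_spec : Claim_equal_isObjek := by
  intro word _
  show isObjek word = isObjek_alt word
  exact pvAB word.toList
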